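-- pv_equiv track=rewrite | github.com/Tomx0826/Score-Based-Matching-for-City-Scale-Multi-Target-Multi-Camera-Vehicle-Tracking | REID/aic22_track_uda/datasets/make_dataloaderV2.py | class_balance_weight
-- ===== SOURCE A (Python) =====
-- from collections import defaultdict
--
-- def zero():
--     return 0
--
-- def class_balance_weight(list_pids):
--     class_weight_dict = defaultdict(zero)
--     for pid in list_pids:
--         class_weight_dict[pid]+=1
--     class_weights = []
--     for key in sorted(class_weight_dict.keys()):
--          class_weights.append(class_weight_dict[key])
--     return class_weights
-- ===== SOURCE B (Python) =====
-- def class_balance_weight(list_pids):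
--     # sort once, then count run lengths in a single scan
--     s = sorted(list_pids)
--     counts = []
--     i, n = 0, len(s)
--     while i < n:
--         j = i + 1
--         while j < n and s[j] == s[i]:
--             j += 1
--         counts.append(j - i)
--         i = j
--     return counts
-- ===== Notes on version B (the rewrite author's own statement) =====
-- stated objective: alternative
-- what changed: Replaces the defaultdict counting pass plus a separate sort over the dict keys with a single sort of the whole list followed by one run-length-counting scan.
import Mathlib
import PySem

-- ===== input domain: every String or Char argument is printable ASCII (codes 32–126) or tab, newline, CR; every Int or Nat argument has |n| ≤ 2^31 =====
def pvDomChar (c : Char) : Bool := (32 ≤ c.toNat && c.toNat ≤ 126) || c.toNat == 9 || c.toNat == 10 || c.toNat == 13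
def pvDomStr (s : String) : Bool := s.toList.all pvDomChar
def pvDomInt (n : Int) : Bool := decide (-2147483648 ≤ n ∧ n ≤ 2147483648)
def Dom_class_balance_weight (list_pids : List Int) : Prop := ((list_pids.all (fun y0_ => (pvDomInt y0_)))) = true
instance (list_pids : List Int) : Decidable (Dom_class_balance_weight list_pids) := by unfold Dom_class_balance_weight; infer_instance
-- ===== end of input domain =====

-- B replaces the defaultdict counting pass plus a separate key sort with one sort of
-- the whole list followed by a single run-length-counting scan (objective: alternative).

-- ===== PORT A =====
-- class_weight_dict = defaultdict(zero); for pid: class_weight_dict[pid] += 1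
-- (read the current count, default 0, and store count+1); then for key in
-- sorted(class_weight_dict.keys()): class_weights.append(class_weight_dict[key])
def class_balance_weight (list_pids : List Int) : List Int :=
  let class_weight_dict : PySem.Dict Int Int :=
    list_pids.foldl (fun d pid => d.insert pid (d.getD pid 0 + 1)) PySem.Dict.empty
  (PySem.List.sorted class_weight_dict.keys (fun k => k) false).foldl
    (fun class_weights key => class_weights ++ [class_weight_dict.getD key 0]) []

-- ===== PORT B =====
-- the outer while loop of Source B: each iteration consumes one run of equal elements
-- (the inner 'while j < n and s[j] == s[i]' is the takeWhile) and emits its length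
def pvRuns : List Int → List Int
  | [] => []
  | x :: t =>
    let run := t.takeWhile (fun y => y == x)
    ((run.length : Int) + 1) :: pvRuns (t.drop run.length)
termination_by l => l.length
decreasing_by
  simp only [List.length_drop, List.length_cons]
  omega

def class_balance_weight_alt (list_pids : List Int) : List Int :=
  pvRuns (PySem.List.sorted list_pids (fun x => x) false)

-- ===== PRECONDITION & SPEC =====
def Spec_class_balance_weight (list_pids : List Int) (out : List Int) : Prop := out = class_balance_weight_alt list_pids
instance (list_pids : List Int) (out : List Int) : Decidable (Spec_class_balance_weight list_pids out) := by unfold Spec_class_balance_weight; infer_instance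

-- ===== CLAIM (what is proved, stated in full; the proofs are below) =====
def Claim_equal_class_balance_weight : Prop := ∀ (list_pids : List Int), Dom_class_balance_weight list_pids → Spec_class_balance_weight list_pids (class_balance_weight list_pids)

-- ===== LEMMAS AND PROOFS =====

-- On a ≤-sorted list s the run-length scan yields exactly the multiplicities of the
-- distinct elements: there is a <-sorted list ks of the distinct elements of s with
-- pvRuns s = ks.map (count in s).
lemma pvRuns_spec (s : List Int) (h : s.Pairwise (· ≤ ·)) :
    ∃ ks : List Int, ks.Pairwise (· < ·) ∧ (∀ k, k ∈ ks ↔ k ∈ s) ∧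
      pvRuns s = ks.map (fun k => (s.count k : Int)) := by
  induction s using pvRuns.induct with
  | case1 => exact ⟨[], by simp, by simp, by simp [pvRuns]⟩
  | case2 x t run ih =>
    set u := t.takeWhile (fun y => y == x) with hu
    set r := t.dropWhile (fun y => y == x) with hr
    have hdecomp : t = u ++ r := (List.takeWhile_append_dropWhile).symm
    have hdrop : t.drop u.length = r := by
      conv_lhs => rw [hdecomp]
      exact List.drop_left
    have hrunx : ∀ y ∈ u, y = x := fun y hy => by
      simpa using List.mem_takeWhile_imp hy
    have hle : ∀ y ∈ t, x ≤ y := fun y hy => (List.pairwise_cons.mp h).1 y hy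
    have hrt : ∀ y ∈ r, y ∈ t := fun y hy => hdecomp ▸ List.mem_append_right _ hy
    have hrsorted : r.Pairwise (· ≤ ·) := by
      have h2 := (List.pairwise_cons.mp h).2
      rw [hdecomp] at h2
      exact h2.sublist (List.sublist_append_right _ _)
    have hgt : ∀ y ∈ r, x < y := by
      cases hz : r with
      | nil => simp
      | cons z r' =>
        have hzx : (z == x) = false := by
          have h3 := List.head?_dropWhile_not (p := fun y => y == x) (l := t)
          rw [← hr, hz] at h3
          simpa using h3
        have hxz : x < z :=
          lt_of_le_of_ne (hle z (hrt z (by simp [hz]))) (Ne.symm (by simpa using hzx))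
        intro y hy
        rcases List.mem_cons.mp hy with rfl | hy'
        · exact hxz
        · have hp := List.pairwise_cons.mp (hz ▸ hrsorted)
          exact lt_of_lt_of_le hxz (hp.1 y hy')
    rw [hdrop] at ih
    obtain ⟨ks, hks_lt, hks_mem, hks_eq⟩ := ih hrsorted
    have hxks : x ∉ ks := fun hx => lt_irrefl x (hgt x ((hks_mem x).mp hx))
    refine ⟨x :: ks, ?_, ?_, ?_⟩
    · exact List.pairwise_cons.mpr ⟨fun k hk => hgt k ((hks_mem k).mp hk), hks_lt⟩
    · intro k
      simp only [List.mem_cons, hks_mem]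
      constructor
      · rintro (rfl | hk)
        · exact .inl rfl
        · exact .inr (hrt k hk)
      · rintro (rfl | hk)
        · exact .inl rfl
        · rw [hdecomp, List.mem_append] at hk
          rcases hk with hk | hk
          · exact .inl (hrunx k hk)
          · exact .inr hk
    · have hcount_u : u.count x = u.length := by
        rw [List.count_eq_length]
        intro y hy; exact (hrunx y hy).symm
      have hcount_rx : r.count x = 0 := by
        rw [List.count_eq_zero]
        intro hx; exact lt_irrefl x (hgt x hx)
      have hcount_k : ∀ k ∈ ks, (x :: t).count k = r.count k := by
        intro k hk
        have hkx : x ≠ k := fun e => lt_irrefl x (e ▸ hgt k ((hks_mem k).mp hk))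
        have hku : u.count k = 0 := by
          rw [List.count_eq_zero]
          intro hx; exact hkx ((hrunx k hx).symm)
        rw [hdecomp, List.count_cons, List.count_append, hku]
        simp [hkx]
      simp only [pvRuns, List.map_cons]
      rw [hdrop, hks_eq]
      congr 1
      · have hcx : (x :: t).count x = u.length + 1 := by
          rw [List.count_cons_self, hdecomp, List.count_append, hcount_u, hcount_rx]
        rw [← hu, hcx]
        push_cast; ring
      · exact (List.map_congr_left fun k hk => by rw [hcount_k k hk]).symm

-- A's result is the count of each distinct pid, in ascending pid order
lemma classA_eq (xs : List Int) :
    class_balance_weight xs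
      = (PySem.List.sorted (PySem.Set.ofList xs) (fun k => k) false).map
          (fun k => (xs.count k : Int)) := by
  show ((PySem.List.sorted ((xs.foldl (fun d pid => d.insert pid (d.getD pid 0 + 1)) (PySem.Dict.empty : PySem.Dict Int Int)).keys) (fun k => k) false).foldl
    (fun cw key => cw ++ [(xs.foldl (fun d pid => d.insert pid (d.getD pid 0 + 1)) (PySem.Dict.empty : PySem.Dict Int Int)).getD key 0]) []) = _
  rw [PySem.Dict.foldl_insert_getD_add_one_eq_counter]
  rw [PySem.List.foldl_append_singleton_eq_map, PySem.Dict.keys_counter]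
  simp [PySem.Dict.getD_counter]

lemma classAB_eq (xs : List Int) : class_balance_weight xs = class_balance_weight_alt xs := by
  have hs := PySem.List.sorted_pairwise xs (fun x => x)
  obtain ⟨ks, hlt, hmem, heq⟩ := pvRuns_spec _ hs
  have hperm := PySem.List.sorted_perm xs (fun x => x) false
  have hnd : ks.Nodup := hlt.imp fun h => ne_of_lt h
  have hperm2 : ks.Perm (PySem.Set.ofList xs) := by
    rw [List.perm_ext_iff_of_nodup hnd (PySem.Set.nodup_ofList xs)]
    intro a
    rw [hmem, PySem.Set.mem_ofList]
    exact hperm.mem_iff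
  rw [classA_eq, class_balance_weight_alt, heq,
    PySem.List.sorted_eq_of_perm_of_pairwise_lt _ _ _ hperm2 hlt]
  exact List.map_congr_left fun k _ => by rw [hperm.count_eq]

-- ===== VERDICT (by name: the statement is the Claim_ definition above) =====
theorem class_balance_weight_spec : Claim_equal_class_balance_weight :=
  fun list_pids _ => classAB_eq list_pids
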